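-- pv_equiv track=rewrite | github.com/HarisHidayatul/printer_read_pin | python/get_data_from_micro_2.py | downsample_character
-- ===== SOURCE A (Python) =====
-- def downsample_character(string_data, factor_h=2, factor_w=1):
--     lines = [line for line in string_data.strip().split("\n")]
--
--     original_height = len(lines)
--     original_width = max(len(line) for line in lines)
--
--     # Pastikan semua baris memiliki lebar yang sama (padding jika perlu)
--     lines = [line.ljust(original_width) for line in lines]
--
--     # Tentukan ukuran baru
--     new_height = original_height // factor_h
--     new_width = original_width // factor_w
--
--     # Buffer untuk menyimpan hasil
--     downsampled = []
--
--     # Iterasi dengan langkah `factor_h` untuk tinggi dan `factor_w` untuk lebar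
--     for i in range(0, original_height - factor_h + 1, factor_h):
--         new_line = ""
--         for j in range(0, original_width - factor_w + 1, factor_w):
--             # Ambil blok (factor_h x factor_w)
--             block = [lines[i + k][j:j+factor_w] for k in range(factor_h) if i + k < original_height]
--
--             # Jika ada 'X' dalam blok, pertahankan bentuk
--             if any("X" in row for row in block):
--                 new_line += "X"
--             else:
--                 new_line += " "  # Atau bisa juga " "
--
--         downsampled.append(new_line)
--
--     return "\n".join(downsampled)
-- ===== SOURCE B (Python) =====
-- def downsample_character(string_data, factor_h=2, factor_w=1):
--     lines = string_data.strip().split("\n")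
--     height = len(lines)
--     width = max(len(line) for line in lines)
--     lines = [line.ljust(width) for line in lines]
--     rows = []
--     for i in range(0, height - factor_h + 1, factor_h):
--         group = lines[i:i + factor_h]
--         merged = ["X" if any(r[c] == "X" for r in group) else " " for c in range(width)]
--         rows.append("".join("X" if "X" in merged[j:j + factor_w] else " "
--                             for j in range(0, width - factor_w + 1, factor_w)))
--     return "\n".join(rows)
-- ===== Notes on version B (the rewrite author's own statement) =====
-- stated objective: alternative
-- what changed: A tests each (factor_h x factor_w) block by collecting row slices inside a doubly nested loop; B splits the work into a vertical pass that ORs each row group into one merged row and a separate horizontal pass over that merged row, so the block-assembly inner loop disappears.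
import Mathlib
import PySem

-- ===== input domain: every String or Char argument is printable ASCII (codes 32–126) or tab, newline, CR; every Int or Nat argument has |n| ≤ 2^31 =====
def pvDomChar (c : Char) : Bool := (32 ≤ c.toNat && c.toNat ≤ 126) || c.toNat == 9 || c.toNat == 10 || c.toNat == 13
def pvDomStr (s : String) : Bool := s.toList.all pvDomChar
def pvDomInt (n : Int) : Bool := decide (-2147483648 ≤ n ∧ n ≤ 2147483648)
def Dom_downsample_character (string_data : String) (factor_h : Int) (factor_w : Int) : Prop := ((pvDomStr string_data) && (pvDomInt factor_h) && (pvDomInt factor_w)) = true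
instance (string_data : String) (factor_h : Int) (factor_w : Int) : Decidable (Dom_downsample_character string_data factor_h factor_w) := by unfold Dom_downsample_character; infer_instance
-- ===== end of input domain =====

-- B replaces A's per-block doubly nested scan by a vertical OR-merge pass followed by a
-- separate horizontal pass over each merged row (alternative decomposition, same cost).

-- ===== PORT A =====
def downsample_character (string_data : String) (factor_h : Int) (factor_w : Int) : String :=
  let lines0 : List (List Char) :=
    PySem.Chars.splitOn (PySem.Chars.strip string_data.toList) ['\n']
  let original_height : Int := lines0.length
  let original_width : Int :=
    (PySem.List.max? (lines0.map (fun l => (l.length : Int))) (fun x => x)).getD 0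
  -- line.ljust(W): exact, W = max line length ≥ len(line) and the pad character is ' '
  let lines : List (List Char) :=
    lines0.map (fun l => l ++ List.replicate (original_width.toNat - l.length) ' ')
  let _new_height : Int := PySem.Int.floordiv original_height factor_h  -- computed, unused
  let _new_width : Int := PySem.Int.floordiv original_width factor_w    -- computed, unused
  let downsampled : List (List Char) :=
    (PySem.List.pyRange 0 (original_height - factor_h + 1) factor_h).foldl (fun acc i =>
      let new_line : List Char :=
        (PySem.List.pyRange 0 (original_width - factor_w + 1) factor_w).foldl (fun nl j =>
          let block : List (List Char) :=
            (PySem.List.pyRange 0 factor_h 1).foldl (fun b k =>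
              if i + k < original_height then
                -- lines[i+k]: guarded in range, pyGetD default never read
                b ++ [PySem.List.slice (PySem.List.pyGetD lines (i + k) []) (some j) (some (j + factor_w))]
              else b) []
          if block.any (fun row => PySem.Chars.isIn ['X'] row) then nl ++ ['X'] else nl ++ [' ']) []
      acc ++ [new_line]) []
  String.ofList (PySem.Chars.join ['\n'] downsampled)

-- ===== PORT B =====
def downsample_character_alt (string_data : String) (factor_h : Int) (factor_w : Int) : String :=
  let lines0 : List (List Char) :=
    PySem.Chars.splitOn (PySem.Chars.strip string_data.toList) ['\n']
  let height : Int := lines0.length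
  let width : Int :=
    (PySem.List.max? (lines0.map (fun l => (l.length : Int))) (fun x => x)).getD 0
  let lines : List (List Char) :=
    lines0.map (fun l => l ++ List.replicate (width.toNat - l.length) ' ')
  let rows : List (List Char) :=
    (PySem.List.pyRange 0 (height - factor_h + 1) factor_h).foldl (fun acc i =>
      let group : List (List Char) := PySem.List.slice lines (some i) (some (i + factor_h))
      let merged : List Char :=
        (PySem.List.pyRange 0 width 1).map (fun c =>
          -- r[c]: c < width = len(r) for every padded row, pyGetD default never read
          if group.any (fun r => PySem.List.pyGetD r c ' ' == 'X') then 'X' else ' ')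
      let row : List Char :=
        (PySem.List.pyRange 0 (width - factor_w + 1) factor_w).map (fun j =>
          if PySem.Chars.isIn ['X'] (PySem.List.slice merged (some j) (some (j + factor_w))) then 'X' else ' ')
      acc ++ [row]) []
  String.ofList (PySem.Chars.join ['\n'] rows)

-- ===== PRECONDITION & SPEC =====
-- A raises on factor 0 (ZeroDivisionError in `//`, ValueError in range with step 0); excluded.
def Pre_downsample_character (string_data : String) (factor_h : Int) (factor_w : Int) : Prop :=
  factor_h ≠ 0 ∧ factor_w ≠ 0
instance (string_data : String) (factor_h : Int) (factor_w : Int) : Decidable (Pre_downsample_character string_data factor_h factor_w) := by unfold Pre_downsample_character; infer_instance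
def pvWitness_downsample_character : String × Int × Int := ("X .\n. X\nXX", 2, 1)

def Spec_downsample_character (string_data : String) (factor_h : Int) (factor_w : Int) (out : String) : Prop := out = downsample_character_alt string_data factor_h factor_w
instance (string_data : String) (factor_h : Int) (factor_w : Int) (out : String) : Decidable (Spec_downsample_character string_data factor_h factor_w out) := by unfold Spec_downsample_character; infer_instance

-- ===== CLAIM (what is proved, stated in full; the proofs are below) =====
def Claim_equal_downsample_character : Prop := ∀ (string_data : String) (factor_h : Int) (factor_w : Int), Dom_downsample_character string_data factor_h factor_w → Pre_downsample_character string_data factor_h factor_w → Spec_downsample_character string_data factor_h factor_w (downsample_character string_data factor_h factor_w)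

-- ===== LEMMAS AND PROOFS =====

-- splitOn never returns the empty list (Python's s.split(sep) has at least one piece)
theorem pv_splitOn_go_ne_nil (sep : List Char) (fuel : Nat) (l cur : List Char)
    (acc : List (List Char)) : PySem.Chars.splitOn.go sep fuel l cur acc ≠ [] := by
  induction fuel generalizing l cur acc with
  | zero => simp [PySem.Chars.splitOn.go]
  | succ n ih =>
    cases l with
    | nil => simp [PySem.Chars.splitOn.go]
    | cons c rest =>
      rw [PySem.Chars.splitOn.go]
      split
      · exact ih _ _ _
      · exact ih _ _ _

theorem pv_splitOn_ne_nil (s sep : List Char) : PySem.Chars.splitOn s sep ≠ [] := by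
  exact pv_splitOn_go_ne_nil sep _ s [] []

theorem pv_pyRange_neg_nil {a b s : Int} (hs : s < 0) (hab : a ≤ b) :
    PySem.List.pyRange a b s = [] := by
  simp only [PySem.List.pyRange]
  rw [if_neg (by omega), if_neg (by omega), if_neg (by omega)]
  simp

theorem pv_mem_take_drop_iff {α : Type} (xs : List α) (a n : Nat) (v : α) :
    v ∈ (xs.drop a).take n ↔ ∃ t, t < n ∧ ∃ h : a + t < xs.length, xs[a + t] = v := by
  rw [List.mem_iff_getElem]
  constructor
  · rintro ⟨u, hu, he⟩
    have hlen : u < n ∧ a + u < xs.length := by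
      simp [List.length_take, List.length_drop] at hu; omega
    refine ⟨u, hlen.1, hlen.2, ?_⟩
    rw [List.getElem_take, List.getElem_drop] at he
    exact he
  · rintro ⟨t, ht, h, he⟩
    refine ⟨t, ?_, ?_⟩
    · simp [List.length_take, List.length_drop]; omega
    · rw [List.getElem_take, List.getElem_drop]; exact he

theorem pv_row_eq (L : List (List Char)) (Wn : Nat) (H W : Int)
    (hH : H = (L.length : Int)) (hWn : W = (Wn : Int))
    (hW : ∀ l ∈ L, l.length = Wn)
    (fh fw i : Int) (hfh : 0 < fh) (hfw : 0 < fw)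
    (hi0 : 0 ≤ i) (hi1 : i + fh ≤ (L.length : Int)) (j : Int)
    (hj0 : 0 ≤ j) :
    (((PySem.List.pyRange 0 fh 1).foldl (fun b k =>
        if i + k < H then
          b ++ [PySem.List.slice (PySem.List.pyGetD L (i + k) []) (some j) (some (j + fw))]
        else b) []).any (fun row => PySem.Chars.isIn ['X'] row))
    = PySem.Chars.isIn ['X'] (PySem.List.slice
        ((PySem.List.pyRange 0 W 1).map (fun c =>
          if (PySem.List.slice L (some i) (some (i + fh))).any
              (fun r => PySem.List.pyGetD r c ' ' == 'X') then 'X' else ' '))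
        (some j) (some (j + fw))) := by
  subst hH hWn
  set g : Int → Char := fun c =>
    if (PySem.List.slice L (some i) (some (i + fh))).any
        (fun r => PySem.List.pyGetD r c ' ' == 'X') then 'X' else ' ' with hg
  rw [PySem.List.foldl_append_ite (p := fun k => i + k < (L.length : Int))
      (f := fun k => PySem.List.slice (PySem.List.pyGetD L (i + k) []) (some j) (some (j + fw)))]
  rw [List.filter_eq_self.mpr (by
    intro k hk
    rw [PySem.List.mem_pyRange_one] at hk
    exact decide_eq_true (by omega))]
  rw [List.nil_append, List.any_map]
  apply Bool.eq_iff_iff.mpr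
  rw [List.any_eq_true]
  rw [PySem.Chars.isIn_iff_infix, List.singleton_infix_iff]
  rw [PySem.List.slice_toNat _ hj0 (by omega)]
  have hjfw : (j + fw).toNat - j.toNat = fw.toNat := by omega
  rw [hjfw, pv_mem_take_drop_iff]
  -- lengths
  have hmlen : ((PySem.List.pyRange 0 (Wn : Int) 1).map g).length = Wn := by
    simp [PySem.List.length_pyRange_one]
  constructor
  · rintro ⟨k, hk, hkP⟩
    rw [PySem.List.mem_pyRange_one] at hk
    simp only [Function.comp] at hkP
    rw [PySem.Chars.isIn_iff_infix, List.singleton_infix_iff,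
        PySem.List.slice_toNat _ hj0 (by omega), hjfw,
        PySem.List.pyGetD_eq_getElem L [] (by omega) (by omega),
        pv_mem_take_drop_iff] at hkP
    obtain ⟨t, ht, hlt, he⟩ := hkP
    have hrow : L[(i+k).toNat].length = Wn := hW _ (List.getElem_mem _)
    refine ⟨t, ht, ?_, ?_⟩
    · omega
    · rw [List.getElem_map, PySem.List.getElem_pyRange_one, hg]
      have : (PySem.List.slice L (some i) (some (i + fh))).any
          (fun r => PySem.List.pyGetD r ((0:Int) + (j.toNat + t : Nat)) ' ' == 'X') = true := by
        rw [List.any_eq_true]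
        refine ⟨L[(i+k).toNat], ?_, ?_⟩
        · rw [PySem.List.slice_toNat _ hi0 (by omega), pv_mem_take_drop_iff]
          exact ⟨k.toNat, by omega, by omega, by congr 1; omega⟩
        · rw [PySem.List.pyGetD_eq_getElem _ ' ' (by omega) (by rw [hrow]; omega)]
          simp only [beq_iff_eq]
          rw [← he]; congr 1; omega
      show (if ((PySem.List.slice L (some i) (some (i + fh))).any
          (fun r => PySem.List.pyGetD r ((0:Int) + (j.toNat + t : Nat)) ' ' == 'X')) = true
          then 'X' else ' ') = 'X'
      rw [if_pos this]
  · rintro ⟨t, ht, hlt, he⟩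
    rw [List.getElem_map, PySem.List.getElem_pyRange_one, hg] at he
    by_cases hc : (PySem.List.slice L (some i) (some (i + fh))).any
        (fun r => PySem.List.pyGetD r ((0:Int) + (j.toNat + t : Nat)) ' ' == 'X') = true
    · rw [List.any_eq_true] at hc
      obtain ⟨r, hr, hre⟩ := hc
      rw [PySem.List.slice_toNat _ hi0 (by omega), pv_mem_take_drop_iff] at hr
      obtain ⟨k, hk, hkl, hkr⟩ := hr
      subst hkr
      have hkfh : (i + fh).toNat - i.toNat = fh.toNat := by omega
      rw [hkfh] at hk
      have hrow : L[i.toNat + k].length = Wn := hW _ (List.getElem_mem _)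
      rw [PySem.List.pyGetD_eq_getElem _ ' ' (by omega) (by rw [hrow]; omega),
          beq_iff_eq] at hre
      have hidx : (i + (k : Int)).toNat = i.toNat + k := by omega
      have hidx2 : ((0:Int) + (j.toNat + t : Nat)).toNat = j.toNat + t := by omega
      simp only [hidx2] at hre
      refine ⟨(k : Int), ?_, ?_⟩
      · rw [PySem.List.mem_pyRange_one]; omega
      · simp only [Function.comp]
        rw [PySem.Chars.isIn_iff_infix, List.singleton_infix_iff,
            PySem.List.slice_toNat _ hj0 (by omega), hjfw,
            PySem.List.pyGetD_eq_getElem L [] (by omega) (by omega),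
            pv_mem_take_drop_iff]
        
        refine ⟨t, ht, ?_, ?_⟩
        · simp only [hidx]; omega
        · simp only [hidx]; exact hre
    · exfalso
      simp only [hc] at he
      exact absurd he (by decide)

theorem downsample_character_spec : Claim_equal_downsample_character := by
  intro s fh fw _dom hpre
  obtain ⟨hfh, hfw⟩ := hpre
  unfold Spec_downsample_character
  simp only [downsample_character, downsample_character_alt]
  set L0 := PySem.Chars.splitOn (PySem.Chars.strip s.toList) ['\n'] with hL0
  set Wi : Int := (PySem.List.max? (L0.map (fun l => (l.length : Int))) (fun x => x)).getD 0 with hWi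
  set L := L0.map (fun l => l ++ List.replicate (Wi.toNat - l.length) ' ') with hL
  have hne : L0 ≠ [] := pv_splitOn_ne_nil _ _
  obtain ⟨m, hm⟩ : ∃ m, PySem.List.max? (L0.map (fun l => (l.length : Int))) (fun x => x) = some m := by
    cases hq : PySem.List.max? (L0.map (fun l => (l.length : Int))) (fun x => x) with
    | none => rw [PySem.List.max?_eq_none_iff, List.map_eq_nil_iff] at hq; exact absurd hq hne
    | some m => exact ⟨m, rfl⟩
  have hWm : Wi = m := by rw [hWi, hm]; rfl
  have hW0 : 0 ≤ Wi := by
    have := PySem.List.max?_mem hm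
    obtain ⟨l0, _, hml⟩ := List.mem_map.mp this
    omega
  have hWle : ∀ l ∈ L0, (l.length : Int) ≤ Wi := by
    intro l hl
    rw [hWm]
    exact PySem.List.max?_isMax hm _ (List.mem_map_of_mem hl)
  have hW : ∀ l ∈ L, l.length = Wi.toNat := by
    intro l hl
    obtain ⟨l0, hl0, rfl⟩ := List.mem_map.mp hl
    have := hWle l0 hl0
    simp [List.length_append, List.length_replicate]
    omega
  have hHL : (L0.length : Int) = (L.length : Int) := by simp [hL]
  refine congrArg String.ofList (congrArg (PySem.Chars.join ['\n']) ?_)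
  rcases lt_trichotomy fh 0 with hneg | hzero | hpos
  · rw [pv_pyRange_neg_nil hneg (by omega)]; rfl
  · exact absurd hzero hfh
  · apply PySem.List.foldl_congr_mem
    intro acc i hi
    rw [PySem.List.mem_pyRange_iff_of_pos hpos] at hi
    obtain ⟨hi0, hi1, -⟩ := hi
    congr 1
    rw [show (fun (nl : List Char) (j : Int) =>
        if (((PySem.List.pyRange 0 fh 1).foldl (fun b k =>
            if i + k < (L0.length : Int) then
              b ++ [PySem.List.slice (PySem.List.pyGetD L (i + k) []) (some j) (some (j + fw))]
            else b) []).any (fun row => PySem.Chars.isIn ['X'] row))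
        then nl ++ ['X'] else nl ++ [' '])
      = (fun (nl : List Char) (j : Int) =>
        nl ++ [if (((PySem.List.pyRange 0 fh 1).foldl (fun b k =>
            if i + k < (L0.length : Int) then
              b ++ [PySem.List.slice (PySem.List.pyGetD L (i + k) []) (some j) (some (j + fw))]
            else b) []).any (fun row => PySem.Chars.isIn ['X'] row))
          then 'X' else ' ']) from by funext nl j; split <;> rfl]
    rw [PySem.List.foldl_append_singleton_eq_map, List.nil_append]
    rcases lt_trichotomy fw 0 with hwneg | hwzero | hwpos
    · rw [pv_pyRange_neg_nil hwneg (by omega)]; rfl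
    · exact absurd hwzero hfw
    · congr 1
      apply List.map_congr_left
      intro j hj
      rw [PySem.List.mem_pyRange_iff_of_pos hwpos] at hj
      obtain ⟨hj0, -, -⟩ := hj
      rw [pv_row_eq L Wi.toNat (L0.length : Int) Wi hHL (by omega) hW fh fw i hpos hwpos hi0
          (by omega) j hj0]
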